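-- pv_equiv track=rewrite | github.com/MarcoYou/open-proxy-mcp | open_proxy_mcp/services/treasury_share.py | _summary_counts
-- ===== SOURCE A (Python) =====
-- from typing import Any
--
-- def _summary_counts(bundles: dict[str, list[dict]]) -> dict[str, Any]:
--     acq = bundles.get("acquisition", [])
--     # 취득목적에 "소각" 명시된 건. 별도 소각결정 공시 없는 기업(예: 미래에셋증권)에서 주주환원 신호로 쓰임.
--     acq_for_retirement = [r for r in acq if r.get("for_retirement")]
--     return {
--         "acquisition_count": len(acq),
--         "acquisition_for_retirement_count": len(acq_for_retirement),
--         "disposal_count": len(bundles.get("disposal", [])),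
--         "trust_contract_count": len(bundles.get("trust_contract", [])),
--         "trust_termination_count": len(bundles.get("trust_termination", [])),
--         "retirement_count": len(bundles.get("retirement", [])),
--         "total_event_count": sum(len(bundles.get(k, [])) for k in ("acquisition", "disposal", "trust_contract", "trust_termination", "retirement")),
--         "acquisition_shares_total": sum(r.get("shares", 0) for r in acq),
--         "acquisition_amount_total_krw": sum(r.get("amount_krw", 0) for r in acq),
--         "acquisition_for_retirement_shares_total": sum(r.get("shares", 0) for r in acq_for_retirement),
--         "acquisition_for_retirement_amount_total_krw": sum(r.get("amount_krw", 0) for r in acq_for_retirement),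
--         "disposal_shares_total": sum(r.get("shares", 0) for r in bundles.get("disposal", [])),
--         "trust_contract_amount_total_krw": sum(r.get("amount_krw", 0) for r in bundles.get("trust_contract", [])),
--     }
-- ===== SOURCE B (Python) =====
-- def _summary_counts(bundles):
--     # One accumulating pass per bundle list instead of independent comprehensions/sums.
--     a_cnt = a_sh = a_amt = f_cnt = f_sh = f_amt = 0
--     for r in bundles.get("acquisition", []):
--         sh = r.get("shares", 0)
--         am = r.get("amount_krw", 0)
--         a_cnt += 1
--         a_sh += sh
--         a_amt += am
--         if r.get("for_retirement"):
--             f_cnt += 1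
--             f_sh += sh
--             f_amt += am
--     d_cnt = d_sh = 0
--     for r in bundles.get("disposal", []):
--         d_cnt += 1
--         d_sh += r.get("shares", 0)
--     tc_cnt = tc_amt = 0
--     for r in bundles.get("trust_contract", []):
--         tc_cnt += 1
--         tc_amt += r.get("amount_krw", 0)
--     tt_cnt = len(bundles.get("trust_termination", []))
--     rt_cnt = len(bundles.get("retirement", []))
--     return {
--         "acquisition_count": a_cnt,
--         "acquisition_for_retirement_count": f_cnt,
--         "disposal_count": d_cnt,
--         "trust_contract_count": tc_cnt,
--         "trust_termination_count": tt_cnt,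
--         "retirement_count": rt_cnt,
--         "total_event_count": a_cnt + d_cnt + tc_cnt + tt_cnt + rt_cnt,
--         "acquisition_shares_total": a_sh,
--         "acquisition_amount_total_krw": a_amt,
--         "acquisition_for_retirement_shares_total": f_sh,
--         "acquisition_for_retirement_amount_total_krw": f_amt,
--         "disposal_shares_total": d_sh,
--         "trust_contract_amount_total_krw": tc_amt,
--     }
-- ===== Notes on version B (the rewrite author's own statement) =====
-- stated objective: alternative
-- what changed: Replaced the dict of independent comprehensions/sums (which traverse the acquisition list five times and re-look-up each bundle repeatedly) with one accumulating pass per bundle list maintaining running count/shares/amount (and for-retirement) totals, with total_event_count summed from the accumulated counts.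
import Mathlib
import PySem

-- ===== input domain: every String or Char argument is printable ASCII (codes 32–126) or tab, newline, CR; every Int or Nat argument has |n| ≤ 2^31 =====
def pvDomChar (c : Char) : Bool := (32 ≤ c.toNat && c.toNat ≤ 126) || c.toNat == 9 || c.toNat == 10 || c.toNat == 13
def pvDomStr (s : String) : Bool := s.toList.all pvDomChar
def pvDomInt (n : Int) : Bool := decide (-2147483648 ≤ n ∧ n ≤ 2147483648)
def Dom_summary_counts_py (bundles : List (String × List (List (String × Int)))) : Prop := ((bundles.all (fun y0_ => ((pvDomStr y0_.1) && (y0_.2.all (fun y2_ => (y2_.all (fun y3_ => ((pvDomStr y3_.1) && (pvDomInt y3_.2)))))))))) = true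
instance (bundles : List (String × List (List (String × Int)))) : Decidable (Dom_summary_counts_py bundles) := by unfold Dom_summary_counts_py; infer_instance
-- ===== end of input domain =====

-- B replaces A's independent comprehensions/sums by one accumulating pass per bundle list; alternative decomposition, same cost.

-- shared .get helpers (dict.get k, default) for both ports
def pvBGet (bundles : List (String × List (List (String × Int)))) (k : String) : List (List (String × Int)) :=
  (PySem.Dict.mk bundles).getD k []

def pvRGet (r : List (String × Int)) (k : String) (dflt : Int) : Int :=
  (PySem.Dict.mk r).getD k dflt

-- r.get("for_retirement") is truthy iff the key is present with a nonzero Int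
def pvTruthy (r : List (String × Int)) : Bool :=
  match (PySem.Dict.mk r).get? "for_retirement" with
  | some v => v != 0
  | none => false

-- ===== PORT A =====
def summary_counts_py (bundles : List (String × List (List (String × Int)))) : List (String × Int) :=
  let acq := pvBGet bundles "acquisition"
  let acq_for_retirement := acq.filter pvTruthy
  [("acquisition_count", (acq.length : Int)),
   ("acquisition_for_retirement_count", (acq_for_retirement.length : Int)),
   ("disposal_count", ((pvBGet bundles "disposal").length : Int)),
   ("trust_contract_count", ((pvBGet bundles "trust_contract").length : Int)),
   ("trust_termination_count", ((pvBGet bundles "trust_termination").length : Int)),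
   ("retirement_count", ((pvBGet bundles "retirement").length : Int)),
   ("total_event_count",
     (["acquisition", "disposal", "trust_contract", "trust_termination", "retirement"].map
       (fun k => ((pvBGet bundles k).length : Int))).sum),
   ("acquisition_shares_total", (acq.map (fun r => pvRGet r "shares" 0)).sum),
   ("acquisition_amount_total_krw", (acq.map (fun r => pvRGet r "amount_krw" 0)).sum),
   ("acquisition_for_retirement_shares_total", (acq_for_retirement.map (fun r => pvRGet r "shares" 0)).sum),
   ("acquisition_for_retirement_amount_total_krw", (acq_for_retirement.map (fun r => pvRGet r "amount_krw" 0)).sum),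
   ("disposal_shares_total", ((pvBGet bundles "disposal").map (fun r => pvRGet r "shares" 0)).sum),
   ("trust_contract_amount_total_krw", ((pvBGet bundles "trust_contract").map (fun r => pvRGet r "amount_krw" 0)).sum)]

-- ===== PORT B =====
-- the single acquisition pass: count/shares/amount and for-retirement count/shares/amount
def pvAcqStep (st : Int × Int × Int × Int × Int × Int) (r : List (String × Int)) :
    Int × Int × Int × Int × Int × Int :=
  let (c, s, a, fc, fs, fa) := st
  let sh := pvRGet r "shares" 0
  let am := pvRGet r "amount_krw" 0
  if pvTruthy r then (c + 1, s + sh, a + am, fc + 1, fs + sh, fa + am)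
  else (c + 1, s + sh, a + am, fc, fs, fa)

def pvDispStep (st : Int × Int) (r : List (String × Int)) : Int × Int :=
  (st.1 + 1, st.2 + pvRGet r "shares" 0)

def pvTrustStep (st : Int × Int) (r : List (String × Int)) : Int × Int :=
  (st.1 + 1, st.2 + pvRGet r "amount_krw" 0)

def summary_counts_py_alt (bundles : List (String × List (List (String × Int)))) : List (String × Int) :=
  let (aCnt, aSh, aAmt, fCnt, fSh, fAmt) :=
    (pvBGet bundles "acquisition").foldl pvAcqStep (0, 0, 0, 0, 0, 0)
  let (dCnt, dSh) := (pvBGet bundles "disposal").foldl pvDispStep (0, 0)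
  let (tcCnt, tcAmt) := (pvBGet bundles "trust_contract").foldl pvTrustStep (0, 0)
  let ttCnt : Int := (pvBGet bundles "trust_termination").length
  let rtCnt : Int := (pvBGet bundles "retirement").length
  [("acquisition_count", aCnt),
   ("acquisition_for_retirement_count", fCnt),
   ("disposal_count", dCnt),
   ("trust_contract_count", tcCnt),
   ("trust_termination_count", ttCnt),
   ("retirement_count", rtCnt),
   ("total_event_count", aCnt + dCnt + tcCnt + ttCnt + rtCnt),
   ("acquisition_shares_total", aSh),
   ("acquisition_amount_total_krw", aAmt),
   ("acquisition_for_retirement_shares_total", fSh),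
   ("acquisition_for_retirement_amount_total_krw", fAmt),
   ("disposal_shares_total", dSh),
   ("trust_contract_amount_total_krw", tcAmt)]

-- ===== PRECONDITION & SPEC =====
def Spec_summary_counts_py (bundles : List (String × List (List (String × Int)))) (out : List (String × Int)) : Prop := out = summary_counts_py_alt bundles
instance (bundles : List (String × List (List (String × Int)))) (out : List (String × Int)) : Decidable (Spec_summary_counts_py bundles out) := by unfold Spec_summary_counts_py; infer_instance

-- ===== CLAIM (what is proved, stated in full; the proofs are below) =====
def Claim_equal_summary_counts_py : Prop := ∀ (bundles : List (String × List (List (String × Int)))), Dom_summary_counts_py bundles → Spec_summary_counts_py bundles (summary_counts_py bundles)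

-- ===== LEMMAS AND PROOFS =====

theorem pvAcqStep_foldl (l : List (List (String × Int))) (c s a fc fs fa : Int) :
    l.foldl pvAcqStep (c, s, a, fc, fs, fa) =
      (c + l.length,
       s + (l.map (fun r => pvRGet r "shares" 0)).sum,
       a + (l.map (fun r => pvRGet r "amount_krw" 0)).sum,
       fc + (l.filter pvTruthy).length,
       fs + ((l.filter pvTruthy).map (fun r => pvRGet r "shares" 0)).sum,
       fa + ((l.filter pvTruthy).map (fun r => pvRGet r "amount_krw" 0)).sum) := by
  induction l generalizing c s a fc fs fa with
  | nil => simp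
  | cons r t ih =>
    by_cases h : pvTruthy r = true <;>
      simp [pvAcqStep, h, ih] <;> ring_nf <;> simp

theorem pvDispStep_foldl (l : List (List (String × Int))) (c s : Int) :
    l.foldl pvDispStep (c, s) =
      (c + l.length, s + (l.map (fun r => pvRGet r "shares" 0)).sum) := by
  induction l generalizing c s with
  | nil => simp
  | cons r t ih => simp [pvDispStep, ih]; ring_nf; simp

theorem pvTrustStep_foldl (l : List (List (String × Int))) (c s : Int) :
    l.foldl pvTrustStep (c, s) =
      (c + l.length, s + (l.map (fun r => pvRGet r "amount_krw" 0)).sum) := by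
  induction l generalizing c s with
  | nil => simp
  | cons r t ih => simp [pvTrustStep, ih]; ring_nf; simp

-- ===== VERDICT (by name: the statement is the Claim_ definition above) =====
theorem summary_counts_py_spec : Claim_equal_summary_counts_py := by
  intro bundles _
  unfold Spec_summary_counts_py summary_counts_py summary_counts_py_alt
  simp [pvAcqStep_foldl, pvDispStep_foldl, pvTrustStep_foldl]
  ring
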